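-- pv_equiv track=rewrite | github.com/CCallahanIV/data-structures | src/decision_tree.py | _is_pure
-- ===== SOURCE A (Python) =====
-- def _is_pure(data):
--     """Check to see if the data is pure."""
--     setosa = []
--     versicolor = []
--     for each in data:
--         if each[2] == "setosa":
--             setosa.append(each)
--         else:
--             versicolor.append(each)
--     if len(setosa) == 0:
--         return True
--     elif len(versicolor) == 0:
--         return True
--     return False
-- ===== SOURCE B (Python) =====
-- def _is_pure(data):
--     """Check to see if the data is pure."""
--     if not data:
--         return True
--     first, *rest = data
--     ref = (first[2] == "setosa")
--     for row in rest:
--         if (row[2] == "setosa") != ref: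
--             return False
--     return True
-- ===== Notes on version B (the rewrite author's own statement) =====
-- stated objective: simpler
-- what changed: Instead of partitioning rows into two accumulated lists and testing their lengths, B takes the first row's class flag as reference and scans the rest with an early return at the first disagreeing row, building no containers at all.
import Mathlib
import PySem

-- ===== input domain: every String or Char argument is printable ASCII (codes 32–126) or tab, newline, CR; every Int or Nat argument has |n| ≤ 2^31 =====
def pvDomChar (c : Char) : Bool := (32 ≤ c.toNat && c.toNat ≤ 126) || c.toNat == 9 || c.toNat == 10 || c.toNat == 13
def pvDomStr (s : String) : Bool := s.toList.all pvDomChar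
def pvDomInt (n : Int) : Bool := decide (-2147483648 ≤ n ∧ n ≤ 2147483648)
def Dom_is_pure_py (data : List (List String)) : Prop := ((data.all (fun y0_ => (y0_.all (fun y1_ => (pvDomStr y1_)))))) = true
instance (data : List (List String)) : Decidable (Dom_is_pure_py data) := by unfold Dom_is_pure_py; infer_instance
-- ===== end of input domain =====

-- B replaces A's two-list partition-and-count with a compare-to-first scan that
-- returns False at the first disagreeing row (simpler, no containers built).
-- Pre_ excludes rows shorter than 3, on which Python A raises IndexError at each[2].

-- ===== PORT A =====
-- literal port of A: partition into two appended lists, then test their lengths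
def is_pure_py (data : List (List String)) : Bool :=
  let st := data.foldl
    (fun (acc : List (List String) × List (List String)) each =>
      if ((PySem.List.pyGet? each 2).getD "" == "setosa") then (acc.1 ++ [each], acc.2)
      else (acc.1, acc.2 ++ [each]))
    ([], [])
  if st.1.length == 0 then true
  else if st.2.length == 0 then true
  else false

-- ===== PORT B =====
-- the early-exit loop over rest: first disagreeing flag returns false
def pvScanRest (ref : Bool) : List (List String) → Bool
  | [] => true
  | row :: rest =>
    if (((PySem.List.pyGet? row 2).getD "" == "setosa") != ref) then false
    else pvScanRest ref rest

-- literal port of B: empty → True; else reference flag from first row, scan the rest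
def is_pure_py_alt (data : List (List String)) : Bool :=
  match data with
  | [] => true
  | first :: rest => pvScanRest ((PySem.List.pyGet? first 2).getD "" == "setosa") rest

-- ===== PRECONDITION & SPEC =====
-- Pre_ excludes exactly the inputs on which A raises IndexError: a row with fewer than 3 entries.
def Pre_is_pure_py (data : List (List String)) : Prop := ∀ row ∈ data, 3 ≤ row.length
instance (data : List (List String)) : Decidable (Pre_is_pure_py data) := by unfold Pre_is_pure_py; infer_instance
def pvWitness_is_pure_py : List (List String) := [["5.1", "3.5", "setosa"], ["6.2", "2.9", "versicolor"]]

def Spec_is_pure_py (data : List (List String)) (out : Bool) : Prop := out = is_pure_py_alt data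
instance (data : List (List String)) (out : Bool) : Decidable (Spec_is_pure_py data out) := by unfold Spec_is_pure_py; infer_instance

-- ===== CLAIM (what is proved, stated in full; the proofs are below) =====
def Claim_equal_is_pure_py : Prop := ∀ (data : List (List String)), Dom_is_pure_py data → Pre_is_pure_py data → Spec_is_pure_py data (is_pure_py data)

-- ===== LEMMAS AND PROOFS =====

-- the per-row flag both programs branch on
def pvFlag (row : List String) : Bool := ((PySem.List.pyGet? row 2).getD "" == "setosa")

-- A's fold builds (acc.1 ++ filter flag, acc.2 ++ filter ¬flag)
theorem foldA (data : List (List String)) :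
    ∀ a b : List (List String),
      data.foldl
        (fun (acc : List (List String) × List (List String)) each =>
          if pvFlag each then (acc.1 ++ [each], acc.2)
          else (acc.1, acc.2 ++ [each])) (a, b)
      = (a ++ data.filter pvFlag, b ++ data.filter (fun r => ! pvFlag r)) := by
  induction data with
  | nil => intro a b; simp [List.foldl]
  | cons h t ih =>
    intro a b
    by_cases hf : pvFlag h
    · simp [List.foldl, hf, ih]
    · simp [List.foldl, hf, ih]

theorem A_true_iff (data : List (List String)) :
    is_pure_py data = true ↔
      (data.filter pvFlag = [] ∨ data.filter (fun r => ! pvFlag r) = []) := by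
  unfold is_pure_py
  rw [show (fun (acc : List (List String) × List (List String)) each =>
      if ((PySem.List.pyGet? each 2).getD "" == "setosa") then (acc.1 ++ [each], acc.2)
      else (acc.1, acc.2 ++ [each]))
    = (fun (acc : List (List String) × List (List String)) each =>
      if pvFlag each then (acc.1 ++ [each], acc.2)
      else (acc.1, acc.2 ++ [each])) from rfl]
  rw [foldA data [] []]
  simp only [List.nil_append]
  split_ifs with h1 h2 <;>
    simp_all [List.length_eq_zero_iff]

-- B's scan is an all-equal-to-ref test
theorem scan_eq_all (ref : Bool) (l : List (List String)) :
    pvScanRest ref l = l.all (fun r => pvFlag r == ref) := by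
  induction l with
  | nil => rfl
  | cons h t ih =>
    by_cases hf : pvFlag h = ref
    · simp [pvScanRest, pvFlag] at *; simp [hf, ih]
    · simp [pvScanRest, pvFlag] at *; simp [hf]

-- the cons case of A's characterisation, as an all-equal-to-head test
theorem cons_iff (h : List String) (t : List (List String)) :
    (List.filter pvFlag (h :: t) = [] ∨ List.filter (fun r => ! pvFlag r) (h :: t) = []) ↔
    ∀ r ∈ t, pvFlag r = pvFlag h := by
  cases hfh : pvFlag h <;>
    simp [List.filter_cons, hfh, List.filter_eq_nil_iff]

-- ===== VERDICT (by name: the statement is the Claim_ definition above) =====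
theorem is_pure_py_spec : Claim_equal_is_pure_py := by
  intro data _ _
  unfold Spec_is_pure_py
  rw [Bool.eq_iff_iff, A_true_iff]
  cases data with
  | nil => simp [is_pure_py_alt]
  | cons h t =>
    show _ ↔ pvScanRest ((PySem.List.pyGet? h 2).getD "" == "setosa") t = true
    rw [show ((PySem.List.pyGet? h 2).getD "" == "setosa") = pvFlag h from rfl,
        scan_eq_all, cons_iff]
    simp
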